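-- pv_equiv track=rewrite | github.com/J-K-DONG/Algorithm_python | lexicalanalysis/analysis_2.py | check_term
-- ===== SOURCE A (Python) =====
-- def check_term(term):
--     left_idx = 0
--     all_right = True
--     term.append(15)
--     if len(term) < 1:
--         return False
--
--     for cur_idx in range(len(term)):
--         if term[cur_idx] == 15 or term[cur_idx] == 16:
--             all_right = check_factor(term[left_idx:cur_idx])
--             if all_right == False:
--                 break
--             left_idx = cur_idx + 1
--     return all_right
--
-- def check_factor(factor):
--     if len(factor) != 1:
--         return False
--     if factor[0] == 10 or factor[0] == 11:
--         return True
--     else: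
--         return False
-- ===== SOURCE B (Python) =====
-- def check_term(term):
--     term.append(15)
--     if len(term) % 2 == 1:
--         return False
--     for i in range(0, len(term), 2):
--         if term[i] not in (10, 11) or term[i + 1] not in (15, 16):
--             return False
--     return True
-- ===== Notes on version B (the rewrite author's own statement) =====
-- stated objective: simpler
-- what changed: Replaces the delimiter-scan with slice extraction and a check_factor helper by a direct alternation check: after the same append(15), the list must have even length and consist of (symbol-in-{10,11}, delimiter-in-{15,16}) pairs.
import Mathlib
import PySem

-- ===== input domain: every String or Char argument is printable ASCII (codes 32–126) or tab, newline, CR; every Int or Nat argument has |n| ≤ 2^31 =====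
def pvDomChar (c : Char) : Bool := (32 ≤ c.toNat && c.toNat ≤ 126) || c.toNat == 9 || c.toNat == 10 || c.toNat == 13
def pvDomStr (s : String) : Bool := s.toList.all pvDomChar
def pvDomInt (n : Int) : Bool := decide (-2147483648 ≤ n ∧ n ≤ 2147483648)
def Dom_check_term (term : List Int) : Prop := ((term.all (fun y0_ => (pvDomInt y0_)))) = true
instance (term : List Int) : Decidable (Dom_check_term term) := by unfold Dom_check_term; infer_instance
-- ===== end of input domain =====

-- B replaces A's delimiter scan (slice + check_factor helper) by a direct even-length /
-- alternating-pairs check; both sides model Python's in-place `term.append(15)` by working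
-- on `term ++ [15]` (equivalence is about the return value; B performs the same mutation).

-- ===== PORT A =====
def check_factor (factor : List Int) : Bool :=
  if factor.length ≠ 1 then false
  else match PySem.List.pyGet? factor 0 with
    | some v => if v == 10 || v == 11 then true else false
    | none => false   -- unreachable: length = 1

-- the `for cur_idx in range(len(term))` loop, fuel = remaining indices
def checkTermLoop (t : List Int) : Nat → Nat → Nat → Bool → Bool
  | 0, _, _, ar => ar
  | rem + 1, left, cur, ar =>
    let v := PySem.List.pyGetD t (Int.ofNat cur) 0   -- term[cur_idx]; cur < len(t) throughout the range loop
    if v == 15 || v == 16 then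
      let ar' := check_factor (PySem.List.slice t (some (Int.ofNat left)) (some (Int.ofNat cur)))
      if ar' == false then ar'                  -- break; return all_right
      else checkTermLoop t rem (cur + 1) (cur + 1) ar'
    else checkTermLoop t rem left (cur + 1) ar

def check_term (term : List Int) : Bool :=
  let t := term ++ [15]
  if t.length < 1 then false
  else checkTermLoop t t.length 0 0 true

-- ===== PORT B =====
-- the `for i in range(0, len(term), 2)` loop: consume one pair per step
def altPairs : List Int → Bool
  | a :: b :: r =>
    if !(a == 10 || a == 11) || !(b == 15 || b == 16) then false
    else altPairs r
  | _ => true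
def check_term_alt (term : List Int) : Bool :=
  let t := term ++ [15]
  if t.length % 2 = 1 then false
  else altPairs t

-- ===== PRECONDITION & SPEC =====
def Spec_check_term (term : List Int) (out : Bool) : Prop := out = check_term_alt term
instance (term : List Int) (out : Bool) : Decidable (Spec_check_term term out) := by unfold Spec_check_term; infer_instance

-- ===== CLAIM (what is proved, stated in full; the proofs are below) =====
def Claim_equal_check_term : Prop := ∀ (term : List Int), Dom_check_term term → Spec_check_term term (check_term term)

-- ===== LEMMAS AND PROOFS =====

-- abstract view of A's loop: `pend` = the pending slice t[left:cur], `s` = t[cur:]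
def auxA : List Int → List Int → Bool
  | _, [] => true
  | pend, x :: r =>
    if x == 15 || x == 16 then
      if check_factor pend then auxA [] r else false
    else auxA (pend ++ [x]) r

lemma checkTermLoop_eq_auxA (t : List Int) :
    ∀ rem cur left, cur ≤ t.length → rem = t.length - cur → left ≤ cur →
    checkTermLoop t rem left cur true =
      auxA ((t.drop left).take (cur - left)) (t.drop cur) := by
  intro rem
  induction rem with
  | zero =>
    intro cur left hcur hrem _
    have : cur = t.length := by omega
    subst this
    simp [checkTermLoop, auxA]
  | succ rem ih =>
    intro cur left hcur hrem hle
    have hlt : cur < t.length := by omega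
    have hget : PySem.List.pyGetD t (Int.ofNat cur) 0 = t[cur] := by
      simp [List.getD, List.getElem?_eq_getElem hlt]
    have hdrop : t.drop cur = t[cur] :: t.drop (cur + 1) :=
      List.drop_eq_getElem_cons hlt
    rw [checkTermLoop]
    rw [hget]
    by_cases hv : (t[cur] == 15 || t[cur] == 16) = true
    · rw [if_pos hv]
      have hslice : PySem.List.slice t (some (Int.ofNat cur)) (some (Int.ofNat cur)) = [] ∧
          PySem.List.slice t (some (Int.ofNat left)) (some (Int.ofNat cur))
            = (t.drop left).take (cur - left) := by
        constructor
        · simpa using PySem.List.slice_natCast (xs := t) (a := cur) (b := cur)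
        · exact PySem.List.slice_natCast (xs := t) (a := left) (b := cur)
      rw [hslice.2]
      by_cases hcf : check_factor ((t.drop left).take (cur - left)) = true
      · rw [hdrop, auxA, if_pos hv, if_pos hcf, hcf]
        dsimp only
        rw [if_neg (by decide)]
        simpa using ih (cur + 1) (cur + 1) (by omega) (by omega) (by omega)
      · rw [hdrop, auxA, if_pos hv, if_neg hcf]
        have hcf' : check_factor ((t.drop left).take (cur - left)) = false := by
          simpa using hcf
        rw [hcf']
        dsimp only
        rw [if_pos (by decide)]
    · rw [if_neg hv]
      rw [ih (cur + 1) left (by omega) (by omega) (by omega)]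
      rw [hdrop, auxA, if_neg hv]
      congr 1
      have h1 : cur + 1 - left = (cur - left) + 1 := by omega
      rw [h1, List.take_add_one]
      congr 1
      have : (t.drop left)[cur - left]? = t[cur]? := by
        rw [List.getElem?_drop]
        congr 1
        omega
      rw [this, List.getElem?_eq_getElem hlt]
      rfl

-- with a pending segment of length ≥ 2 and a delimiter somewhere ahead, A fails
lemma auxA_fat_pend : ∀ (s pend : List Int), 2 ≤ pend.length →
    (s.getLast? = some 15 ∨ s.getLast? = some 16) → auxA pend s = false := by
  intro s
  induction s with
  | nil => intro pend _ h; simp at h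
  | cons x r ih =>
    intro pend hlen hlast
    rw [auxA]
    by_cases hv : (x == 15 || x == 16) = true
    · rw [if_pos hv]
      have : check_factor pend = false := by
        unfold check_factor
        rw [if_pos (by omega)]
      simp [this]
    · rw [if_neg hv]
      cases r with
      | nil =>
        exfalso
        simp [List.getLast?] at hlast
        rcases hlast with h | h <;> simp [h] at hv
      | cons y ys =>
        apply ih
        · simp; omega
        · simpa [List.getLast?_cons_cons] using hlast

lemma auxA_char : ∀ (t : List Int),
    (t.getLast? = some 15 ∨ t.getLast? = some 16) →
    auxA [] t = ((decide (t.length % 2 = 0)) && altPairs t)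
  | [], hlast => by simp at hlast
  | [a], hlast => by
      simp [List.getLast?] at hlast
      rw [auxA]
      have hv : (a == 15 || a == 16) = true := by
        rcases hlast with h | h <;> simp [h]
      rw [if_pos hv]
      have : check_factor [] = false := by unfold check_factor; simp
      simp [this]
  | a :: b :: r, hlast => by
      have hlastr : r.getLast? = some 15 ∨ r.getLast? = some 16 ∨ r = [] := by
        cases r with
        | nil => right; right; rfl
        | cons y ys =>
          simp only [List.getLast?_cons_cons] at hlast
          rcases hlast with h | h
          · left; exact h
          · right; left; exact h
      rw [auxA]
      by_cases hv : (a == 15 || a == 16) = true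
      · rw [if_pos hv]
        have : check_factor [] = false := by unfold check_factor; simp
        rw [this]
        have hp : altPairs (a :: b :: r) = false := by
          rw [altPairs]
          have : (a == 10 || a == 11) = false := by
            rcases (by simpa using hv : a = 15 ∨ a = 16) with h | h <;> simp [h]
          simp [this]
        simp [hp]
      · rw [if_neg hv]
        rw [auxA]
        by_cases hw : (b == 15 || b == 16) = true
        · rw [if_pos hw]
          have hcf : check_factor ([] ++ [a]) = (a == 10 || a == 11) := by
            unfold check_factor
            by_cases h10 : a = 10
            · simp [h10]
            · by_cases h11 : a = 11
              · simp [h11]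
              · simp [h10, h11]
          rw [hcf]
          by_cases ha : (a == 10 || a == 11) = true
          · rw [ha, if_pos rfl]
            by_cases hnil : r = []
            · subst hnil
              simp [auxA, altPairs, ha, hw]
            · have hrr : r.getLast? = some 15 ∨ r.getLast? = some 16 := by
                rcases hlastr with h | h | h
                · left; exact h
                · right; exact h
                · exact absurd h hnil
              rw [auxA_char r hrr]
              rw [altPairs]
              simp only [ha, hw, Bool.not_true, Bool.or_self]
              rw [if_neg (by simp)]
              have hl : (a :: b :: r).length % 2 = r.length % 2 := by simp; omega
              rw [hl]
          · simp only [Bool.not_eq_true] at ha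
            rw [ha]
            rw [if_neg (by simp)]
            have hp : altPairs (a :: b :: r) = false := by
              rw [altPairs]
              simp [ha]
            simp [hp]
        · rw [if_neg hw]
          have hfat : auxA ([] ++ [a] ++ [b]) r = false := by
            apply auxA_fat_pend
            · simp
            · rcases hlastr with h | h | h
              · left; exact h
              · right; exact h
              · exfalso
                subst h
                simp [List.getLast?] at hlast
                rcases hlast with h | h <;> simp [h] at hw
          rw [hfat]
          have hp : altPairs (a :: b :: r) = false := by
            rw [altPairs]
            simp only [Bool.not_eq_true] at hw
            simp [hw]
          simp [hp]

-- ===== VERDICT (by name: the statement is the Claim_ definition above) =====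
theorem check_term_spec : Claim_equal_check_term := by
  unfold Claim_equal_check_term Spec_check_term
  intro term _
  unfold check_term check_term_alt
  simp only []
  have hlen : (term ++ [15]).length < 1 ↔ False := by simp
  rw [if_neg (by simp)]
  have hmain := checkTermLoop_eq_auxA (term ++ [15]) (term ++ [15]).length 0 0
      (by omega) (by omega) (by omega)
  simp only [Nat.sub_zero, List.drop_zero, List.take_zero] at hmain
  rw [hmain]
  have hlast : (term ++ [15]).getLast? = some 15 ∨ (term ++ [15]).getLast? = some 16 := by
    left; simp
  rw [auxA_char _ hlast]
  have hlen2 : (term ++ [15]).length = term.length + 1 := by simp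
  by_cases hpar : (term ++ [15]).length % 2 = 1
  · rw [if_pos hpar]
    have hd : decide ((term ++ [15]).length % 2 = 0) = false := by
      simp only [decide_eq_false_iff_not]
      omega
    rw [hd, Bool.false_and]
  · rw [if_neg hpar]
    have hd : decide ((term ++ [15]).length % 2 = 0) = true := by
      simp only [decide_eq_true_eq]
      omega
    rw [hd, Bool.true_and]
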